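-- pv_equiv track=rewrite | github.com/chhs2131/TIL | CodingChallenge/LeetCode/228. Summary Ranges/228.py | findNextNumber
-- ===== SOURCE A (Python) =====
-- def findNextNumber(nums, index):
--     start = nums[index]
--     now = start
--     while index < len(nums) - 1:
--         nextNumber = nums[index + 1]
--         if now + 1 != nextNumber:
--             break
--         now = nextNumber
--         index += 1
--     return index
-- ===== SOURCE B (Python) =====
-- def findNextNumber(nums, index):
--     # Backward pass: sweep from the end of the list down to `index`, maintaining
--     # `end` = the last index of the consecutive run starting at the position
--     # just below the current one; a gap resets the candidate end.
--     n = len(nums)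
--     end = n - 1
--     for p in range(n - 2, index - 1, -1):
--         if nums[p] + 1 != nums[p + 1]:
--             end = p
--     return end
-- ===== Notes on version B (the rewrite author's own statement) =====
-- stated objective: alternative
-- what changed: B replaces A's forward walk with running value and early break by a full backward sweep from the end of the list down to index that maintains the candidate run-end, resetting it at every gap; it trades A's early exit for a uniform reverse pass.
import Mathlib
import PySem

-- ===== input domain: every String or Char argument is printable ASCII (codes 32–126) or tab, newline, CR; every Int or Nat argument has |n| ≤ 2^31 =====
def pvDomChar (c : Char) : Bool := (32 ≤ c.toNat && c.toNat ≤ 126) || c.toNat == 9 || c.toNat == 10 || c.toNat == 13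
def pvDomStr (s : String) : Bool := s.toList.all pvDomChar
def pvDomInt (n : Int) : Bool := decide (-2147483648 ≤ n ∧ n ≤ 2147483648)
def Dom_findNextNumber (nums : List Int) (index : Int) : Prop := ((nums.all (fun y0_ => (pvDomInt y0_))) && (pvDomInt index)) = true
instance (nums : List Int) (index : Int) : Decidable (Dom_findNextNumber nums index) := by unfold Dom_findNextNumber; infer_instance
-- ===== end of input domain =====

-- B replaces A's forward walk with early break by a full backward sweep maintaining the candidate run-end (objective: alternative).

-- ===== PORT A =====
-- while-loop of A: state (now, index); fuel only makes the recursion total (2*len is enough iterations).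
def findNextNumberLoop (nums : List Int) : Int → Int → Nat → Int
  | _, i, 0 => i
  | now, i, fuel + 1 =>
    if i < (nums.length : Int) - 1 then
      match PySem.List.pyGet? nums (i + 1) with
      | none => i  -- unreachable when i+1 is in range
      | some nextNumber =>
        if now + 1 ≠ nextNumber then i
        else findNextNumberLoop nums nextNumber (i + 1) fuel
    else i

def findNextNumber (nums : List Int) (index : Int) : Int :=
  match PySem.List.pyGet? nums index with
  | none => index  -- Python raises IndexError here; excluded by Pre_
  | some start => findNextNumberLoop nums start index (2 * nums.length)

-- ===== PORT B =====
-- for-loop over range(n-2, index-1, -1), accumulator `end`, reset to p at each gap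
def findNextNumberAltLoop (nums : List Int) : List Int → Int → Int
  | [], e => e
  | p :: rest, e =>
    findNextNumberAltLoop nums rest
      (match PySem.List.pyGet? nums p, PySem.List.pyGet? nums (p + 1) with
       | some a, some b => if a + 1 ≠ b then p else e
       | _, _ => e)  -- unreachable when p, p+1 are in range

def findNextNumber_alt (nums : List Int) (index : Int) : Int :=
  findNextNumberAltLoop nums
    (PySem.List.pyRange ((nums.length : Int) - 2) (index - 1) (-1))
    ((nums.length : Int) - 1)

-- ===== PRECONDITION & SPEC =====
-- Pre_ excludes exactly the out-of-range indices, on which A raises IndexError.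
def Pre_findNextNumber (nums : List Int) (index : Int) : Prop :=
  PySem.Raise.InRange nums.length index
instance (nums : List Int) (index : Int) : Decidable (Pre_findNextNumber nums index) := by unfold Pre_findNextNumber; infer_instance

def pvWitness_findNextNumber : List Int × Int := ([1, 2, 3, 7], 0)

def Spec_findNextNumber (nums : List Int) (index : Int) (out : Int) : Prop := out = findNextNumber_alt nums index
instance (nums : List Int) (index : Int) (out : Int) : Decidable (Spec_findNextNumber nums index out) := by unfold Spec_findNextNumber; infer_instance

-- ===== CLAIM (what is proved, stated in full; the proofs are below) =====
def Claim_equal_findNextNumber : Prop := ∀ (nums : List Int) (index : Int), Dom_findNextNumber nums index → Pre_findNextNumber nums index → Spec_findNextNumber nums index (findNextNumber nums index)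

-- ===== LEMMAS AND PROOFS =====

-- Common characterisation: runEnd nums i k = last index of the run starting at i, looking at most k steps ahead.
def runEnd (nums : List Int) : Int → Nat → Int
  | i, 0 => i
  | i, k + 1 =>
    match PySem.List.pyGet? nums i, PySem.List.pyGet? nums (i + 1) with
    | some a, some b => if a + 1 = b then runEnd nums (i + 1) k else i
    | _, _ => i

theorem pyGet?_isSome_of_inRange (nums : List Int) (i : Int)
    (hlo : -(nums.length : Int) ≤ i) (hhi : i < (nums.length : Int)) :
    ∃ v, PySem.List.pyGet? nums i = some v := by
  rcases h : PySem.List.pyGet? nums i with _ | v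
  · exact absurd ⟨hlo, hhi⟩ ((PySem.List.pyGet?_eq_none_iff _ _).mp h)
  · exact ⟨v, rfl⟩

-- A's loop computes runEnd (invariant: now = nums[i]).
theorem loopA_eq_runEnd (nums : List Int) :
    ∀ (fuel : Nat) (i now : Int), -(nums.length : Int) ≤ i → i < (nums.length : Int) →
      PySem.List.pyGet? nums i = some now → (nums.length : Int) - 1 - i ≤ (fuel : Int) →
      findNextNumberLoop nums now i fuel = runEnd nums i ((nums.length : Int) - 1 - i).toNat := by
  intro fuel
  induction fuel with
  | zero =>
    intro i now hlo hhi hnow hfuel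
    have hi : ((nums.length : Int) - 1 - i).toNat = 0 := by omega
    simp [findNextNumberLoop, runEnd, hi]
  | succ f ih =>
    intro i now hlo hhi hnow hfuel
    by_cases hlt : i < (nums.length : Int) - 1
    · obtain ⟨b, hb⟩ := pyGet?_isSome_of_inRange nums (i + 1) (by omega) (by omega)
      obtain ⟨k, hk⟩ : ∃ k, ((nums.length : Int) - 1 - i).toNat = k + 1 := by
        refine ⟨((nums.length : Int) - 1 - (i + 1)).toNat, by omega⟩
      rw [hk]
      simp only [findNextNumberLoop, runEnd, if_pos hlt, hnow, hb]
      by_cases h : now + 1 = b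
      · rw [if_neg (by simpa using h), if_pos h,
          ih (i + 1) b (by omega) (by omega) hb (by omega)]
        congr 1
        omega
      · simp [h]
    · have hi : ((nums.length : Int) - 1 - i).toNat = 0 := by omega
      simp [findNextNumberLoop, runEnd, hi, if_neg hlt]
theorem altLoop_append (nums : List Int) (l : List Int) (p e : Int) :
    findNextNumberAltLoop nums (l ++ [p]) e =
      (match PySem.List.pyGet? nums p, PySem.List.pyGet? nums (p + 1) with
       | some a, some b => if a + 1 ≠ b then p else findNextNumberAltLoop nums l e
       | _, _ => findNextNumberAltLoop nums l e) := by
  induction l generalizing e with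
  | nil =>
    simp only [List.nil_append, findNextNumberAltLoop]
  | cons x xs ih =>
    simp only [List.cons_append, findNextNumberAltLoop]
    rw [ih]

-- B's backward sweep computes runEnd as well.
theorem loopB_eq_runEnd (nums : List Int) :
    ∀ (k : Nat) (i : Int), i = (nums.length : Int) - 1 - (k : Int) → -(nums.length : Int) ≤ i →
      findNextNumberAltLoop nums
          (PySem.List.pyRange ((nums.length : Int) - 2) (i - 1) (-1))
          ((nums.length : Int) - 1) = runEnd nums i k := by
  intro k
  induction k with
  | zero =>
    intro i hi hlo
    rw [PySem.List.pyRange_neg_one_eq_nil (by omega)]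
    simp [findNextNumberAltLoop, runEnd, hi]
  | succ k ih =>
    intro i hi hlo
    have hsplit : PySem.List.pyRange ((nums.length : Int) - 2) (i - 1) (-1) =
        PySem.List.pyRange ((nums.length : Int) - 2) i (-1) ++ [i] := by
      rw [PySem.List.pyRange_neg_one_eq_reverse, PySem.List.pyRange_neg_one_eq_reverse]
      have : i - 1 + 1 = i := by omega
      rw [this, PySem.List.pyRange_one_cons (by push_cast at hi; omega)]
      simp
    obtain ⟨a, ha⟩ := pyGet?_isSome_of_inRange nums i (by omega) (by push_cast at hi; omega)
    obtain ⟨b, hb⟩ := pyGet?_isSome_of_inRange nums (i + 1) (by omega) (by push_cast at hi; omega)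
    have hih : findNextNumberAltLoop nums
        (PySem.List.pyRange ((nums.length : Int) - 2) i (-1)) ((nums.length : Int) - 1) =
        runEnd nums (i + 1) k := by
      have h2 := ih (i + 1) (by push_cast at hi ⊢; omega) (by omega)
      rwa [show i + 1 - 1 = i by omega] at h2
    rw [hsplit, altLoop_append, hih]
    simp only [runEnd, ha, hb]
    by_cases h : a + 1 = b
    · rw [if_neg (by simpa using h), if_pos h]
    · simp [h]

-- ===== VERDICT (by name: the statement is the Claim_ definition above) =====
theorem findNextNumber_spec : Claim_equal_findNextNumber := by
  intro nums index _hdom hpre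
  unfold Spec_findNextNumber findNextNumber findNextNumber_alt
  obtain ⟨hlo, hhi⟩ := hpre
  obtain ⟨s, hs⟩ := pyGet?_isSome_of_inRange nums index hlo hhi
  rw [hs]
  show findNextNumberLoop nums s index (2 * nums.length) = _
  rw [loopA_eq_runEnd nums (2 * nums.length) index s hlo hhi hs (by push_cast; omega),
    loopB_eq_runEnd nums (((nums.length : Int) - 1 - index).toNat) index (by omega) hlo]
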